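-- pv_equiv track=rewrite | github.com/posl/comment_recommendation | script/mod_gen/5_time/zh/241_C/4.py | check
-- ===== SOURCE A (Python) =====
-- def check(n, s):
--     for i in range(n):
--         for j in range(n):
--             if s[i][j] == '#':
--                 s[i][j] = 1
--             else:
--                 s[i][j] = 0
--     for i in range(n):
--         for j in range(n):
--             if s[i][j] == 1:
--                 if i + 5 < n:
--                     if s[i + 1][j] == 1 and s[i + 2][j] == 1 and s[i + 3][j] == 1 and s[i + 4][j] == 1 and s[i + 5][j] == 1:
--                         return True
--                 if j + 5 < n:
--                     if s[i][j + 1] == 1 and s[i][j + 2] == 1 and s[i][j + 3] == 1 and s[i][j + 4] == 1 and s[i][j + 5] == 1: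
--                         return True
--                 if i + 5 < n and j + 5 < n:
--                     if s[i + 1][j + 1] == 1 and s[i + 2][j + 2] == 1 and s[i + 3][j + 3] == 1 and s[i + 4][j + 4] == 1 and s[i + 5][j + 5] == 1:
--                         return True
--                 if i + 5 < n and j - 5 >= 0:
--                     if s[i + 1][j - 1] == 1 and s[i + 2][j - 2] == 1 and s[i + 3][j - 3] == 1 and s[i + 4][j - 4] == 1 and s[i + 5][j - 5] == 1:
--                         return True
--     return False
-- ===== SOURCE B (Python) =====
-- def _run6(line):
--     run = 0
--     for x in line:
--         run = run + 1 if x == 1 else 0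
--         if run >= 6:
--             return True
--     return False
--
--
-- def check(n, s):
--     # first pass: convert every cell of the n x n grid to 1/0 in place
--     for i in range(n):
--         for j in range(n):
--             s[i][j] = 1 if s[i][j] == '#' else 0
--     # rows
--     for i in range(n):
--         if _run6([s[i][j] for j in range(n)]):
--             return True
--     # columns
--     for j in range(n):
--         if _run6([s[i][j] for i in range(n)]):
--             return True
--     # down-right diagonals starting on the left column ...
--     for a in range(n):
--         if _run6([s[a + t][t] for t in range(n - a)]):
--             return True
--     # ... and on the top row
--     for b in range(1, n):
--         if _run6([s[t][b + t] for t in range(n - b)]):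
--             return True
--     # down-left diagonals starting on the top row ...
--     for b in range(n):
--         if _run6([s[t][b - t] for t in range(b + 1)]):
--             return True
--     # ... and on the right column
--     for a in range(1, n):
--         if _run6([s[a + t][n - 1 - t] for t in range(n - a)]):
--             return True
--     return False
-- ===== Notes on version B (the rewrite author's own statement) =====
-- stated objective: alternative
-- what changed: Replaces the per-cell five-step lookahead in four directions by run-length scanning: after the same in-place 1/0 conversion pass, each row, column, down-right diagonal and down-left diagonal is scanned once with a run counter that resets on 0 and reports True when it reaches 6.
-- outside the precondition, e.g. on check(2, [['#', '#']]): A raises IndexError, B raises IndexError; on check(2, [['#'], ['#', '#']]): A raises IndexError, B raises IndexError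
import Mathlib
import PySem

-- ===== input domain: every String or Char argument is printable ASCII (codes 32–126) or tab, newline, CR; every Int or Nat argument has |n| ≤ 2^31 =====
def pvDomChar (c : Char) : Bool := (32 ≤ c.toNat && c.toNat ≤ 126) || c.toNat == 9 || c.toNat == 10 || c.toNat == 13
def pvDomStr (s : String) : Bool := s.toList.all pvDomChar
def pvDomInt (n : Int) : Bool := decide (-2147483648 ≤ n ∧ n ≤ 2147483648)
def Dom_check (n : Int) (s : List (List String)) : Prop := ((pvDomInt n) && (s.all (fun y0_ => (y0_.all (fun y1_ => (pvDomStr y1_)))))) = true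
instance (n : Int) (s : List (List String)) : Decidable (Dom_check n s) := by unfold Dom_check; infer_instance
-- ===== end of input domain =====

-- B replaces A's per-cell five-step lookahead by one run-length scan along every row, column and
-- diagonal (objective: alternative decomposition, same asymptotic cost). Python A and B both mutate
-- s in place identically (cells become 1/0); the equivalence proved here is about the return value.

-- ===== PORT A =====
-- first pass of both Pythons: every cell of the n×n region becomes 1/0 (in Python this mutates s
-- in place; the heterogeneous in-place assignment is rebuilt here as the converted n×n grid)
def convGrid (n : Int) (s : List (List String)) : List (List Int) :=
  (PySem.List.pyRange 0 n 1).map (fun i =>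
    (PySem.List.pyRange 0 n 1).map (fun j =>
      if PySem.List.pyGetD (PySem.List.pyGetD s i []) j "" == "#" then (1 : Int) else 0))

-- s[i][j] on the converted grid (in range under Pre_check whenever either Python reads it)
def cell (t : List (List Int)) (i j : Int) : Int :=
  PySem.List.pyGetD (PySem.List.pyGetD t i []) j 0

def check (n : Int) (s : List (List String)) : Bool :=
  let t := convGrid n s
  (PySem.List.pyRange 0 n 1).any fun i =>
    (PySem.List.pyRange 0 n 1).any fun j =>
      cell t i j == 1 &&
        ((decide (i + 5 < n) &&
            (cell t (i + 1) j == 1 && cell t (i + 2) j == 1 && cell t (i + 3) j == 1 &&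
              cell t (i + 4) j == 1 && cell t (i + 5) j == 1)) ||
         (decide (j + 5 < n) &&
            (cell t i (j + 1) == 1 && cell t i (j + 2) == 1 && cell t i (j + 3) == 1 &&
              cell t i (j + 4) == 1 && cell t i (j + 5) == 1)) ||
         (decide (i + 5 < n) && decide (j + 5 < n) &&
            (cell t (i + 1) (j + 1) == 1 && cell t (i + 2) (j + 2) == 1 && cell t (i + 3) (j + 3) == 1 &&
              cell t (i + 4) (j + 4) == 1 && cell t (i + 5) (j + 5) == 1)) ||
         (decide (i + 5 < n) && decide (0 ≤ j - 5) &&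
            (cell t (i + 1) (j - 1) == 1 && cell t (i + 2) (j - 2) == 1 && cell t (i + 3) (j - 3) == 1 &&
              cell t (i + 4) (j - 4) == 1 && cell t (i + 5) (j - 5) == 1)))

-- ===== PORT B =====
-- _run6: run counter resets on a non-1, reports True as soon as it reaches 6
def runScan : List Int → Int → Bool
  | [], _ => false
  | x :: l, run =>
    let run' := if x == 1 then run + 1 else 0
    if 6 ≤ run' then true else runScan l run'

def check_alt (n : Int) (s : List (List String)) : Bool :=
  let t := convGrid n s
  ((PySem.List.pyRange 0 n 1).any fun i =>
      runScan ((PySem.List.pyRange 0 n 1).map fun j => cell t i j) 0) ||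
  ((PySem.List.pyRange 0 n 1).any fun j =>
      runScan ((PySem.List.pyRange 0 n 1).map fun i => cell t i j) 0) ||
  ((PySem.List.pyRange 0 n 1).any fun a =>
      runScan ((PySem.List.pyRange 0 (n - a) 1).map fun u => cell t (a + u) u) 0) ||
  ((PySem.List.pyRange 1 n 1).any fun b =>
      runScan ((PySem.List.pyRange 0 (n - b) 1).map fun u => cell t u (b + u)) 0) ||
  ((PySem.List.pyRange 0 n 1).any fun b =>
      runScan ((PySem.List.pyRange 0 (b + 1) 1).map fun u => cell t u (b - u)) 0) ||
  ((PySem.List.pyRange 1 n 1).any fun a =>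
      runScan ((PySem.List.pyRange 0 (n - a) 1).map fun u => cell t (a + u) (n - 1 - u)) 0)

-- ===== PRECONDITION & SPEC =====
-- Pre_check excludes exactly the inputs on which the Python raises IndexError:
-- fewer than n rows, or one of the first n rows shorter than n.
def Pre_check (n : Int) (s : List (List String)) : Prop :=
  n ≤ s.length ∧ ∀ r ∈ s.take n.toNat, n ≤ r.length
instance (n : Int) (s : List (List String)) : Decidable (Pre_check n s) := by
  unfold Pre_check; infer_instance

def pvWitness_check : Int × List (List String) :=
  (2, [["#", "."], [".", "#"]])

def Spec_check (n : Int) (s : List (List String)) (out : Bool) : Prop := out = check_alt n s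
instance (n : Int) (s : List (List String)) (out : Bool) : Decidable (Spec_check n s out) := by unfold Spec_check; infer_instance

-- ===== CLAIM (what is proved, stated in full; the proofs are below) =====
def Claim_equal_check : Prop := ∀ (n : Int) (s : List (List String)), Dom_check n s → Pre_check n s → Spec_check n s (check n s)

-- ===== LEMMAS AND PROOFS =====

-- run of ones of combined length ≥ 6 using a credit of c ones before the list
def Pref (l : List Int) (c : Nat) : Prop :=
  ∃ p : Nat, p < l.length ∧ 6 ≤ c + p + 1 ∧ ∀ q, q ≤ p → l.getD q 0 = 1

-- six consecutive ones somewhere in the list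
def Has6 (l : List Int) : Prop :=
  ∃ k : Nat, k + 5 < l.length ∧ ∀ t, t ≤ 5 → l.getD (k + t) 0 = 1

theorem pref_zero_imp_has6 {l : List Int} (h : Pref l 0) : Has6 l := by
  obtain ⟨p, hp, h6, hq⟩ := h
  exact ⟨0, by omega, fun t ht => by simpa using hq t (by omega)⟩

theorem runScan_iff (l : List Int) (c : Nat) :
    runScan l (c : Int) = true ↔ Pref l c ∨ Has6 l := by
  induction l generalizing c with
  | nil => simp [runScan, Pref, Has6]
  | cons x l ih =>
    by_cases hx : x = 1
    · subst hx
      have hrun : runScan (1 :: l) (c : Int) =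
          if 6 ≤ (c : Int) + 1 then true else runScan l ((c : Int) + 1) := by
        simp [runScan]
      by_cases h6 : 6 ≤ c + 1
      · rw [hrun, if_pos (by exact_mod_cast h6)]
        constructor
        · intro _
          exact Or.inl ⟨0, by simp, by omega, fun q hq => by
            interval_cases q
            simp⟩
        · intro _; rfl
      · rw [hrun, if_neg (by omega),
          show (c : Int) + 1 = ((c + 1 : Nat) : Int) by push_cast; ring, ih (c + 1)]
        constructor
        · rintro (⟨p, hp, hp6, hq⟩ | ⟨k, hk, h⟩)
          · refine Or.inl ⟨p + 1, by simp; omega, by omega, fun q hq2 => ?_⟩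
            cases q with
            | zero => simp
            | succ q2 =>
              rw [List.getD_cons_succ]
              exact hq q2 (by omega)
          · refine Or.inr ⟨k + 1, by simp at hk ⊢; omega, fun t ht => ?_⟩
            rw [show k + 1 + t = (k + t) + 1 by omega, List.getD_cons_succ]
            exact h t ht
        · rintro (⟨p, hp, hp6, hq⟩ | ⟨k, hk, h⟩)
          · cases p with
            | zero => omega
            | succ p2 =>
              refine Or.inl ⟨p2, by simp at hp; omega, by omega, fun q hq2 => ?_⟩
              have hh := hq (q + 1) (by omega)
              rwa [List.getD_cons_succ] at hh
          · cases k with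
            | zero =>
              refine Or.inl ⟨4, by simp at hk; omega, by omega, fun q hq2 => ?_⟩
              have hh := h (q + 1) (by omega)
              simpa using hh
            | succ k2 =>
              refine Or.inr ⟨k2, by simp at hk; omega, fun t ht => ?_⟩
              have hh := h t ht
              rwa [show k2 + 1 + t = (k2 + t) + 1 by omega, List.getD_cons_succ] at hh
    · have hrun : runScan (x :: l) (c : Int) = runScan l ((0 : Nat) : Int) := by
        simp [runScan, hx]
      rw [hrun, ih 0]
      have shift : Has6 l → Has6 (x :: l) := by
        rintro ⟨k, hk, h⟩
        refine ⟨k + 1, by simp; omega, fun t ht => ?_⟩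
        rw [show k + 1 + t = (k + t) + 1 by omega, List.getD_cons_succ]
        exact h t ht
      constructor
      · rintro (hp | h62)
        · exact Or.inr (shift (pref_zero_imp_has6 hp))
        · exact Or.inr (shift h62)
      · rintro (⟨p, hp, hp6, hq⟩ | ⟨k, hk, h⟩)
        · exact absurd (by simpa using hq 0 (by omega)) hx
        · cases k with
          | zero => exact absurd (by simpa using h 0 (by omega)) hx
          | succ k2 =>
            refine Or.inr ⟨k2, by simp at hk; omega, fun t ht => ?_⟩
            have hh := h t ht
            rwa [show k2 + 1 + t = (k2 + t) + 1 by omega, List.getD_cons_succ] at hh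

theorem runScan_zero_iff (l : List Int) : runScan l 0 = true ↔ Has6 l := by
  have h := runScan_iff l 0
  simp only [Nat.cast_zero] at h
  rw [h]
  constructor
  · rintro (h' | h')
    · exact pref_zero_imp_has6 h'
    · exact h'
  · exact Or.inr

theorem has6_line (f : Int → Int) (L : Int) :
    Has6 ((PySem.List.pyRange 0 L 1).map f) ↔
      ∃ k : Nat, (k : Int) + 5 < L ∧ ∀ t : Nat, t ≤ 5 → f ((k : Int) + (t : Int)) = 1 := by
  rw [PySem.List.pyRange_one, List.map_map]
  unfold Has6
  simp only [List.length_map, List.length_range, sub_zero]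
  constructor
  · rintro ⟨k, hk, h⟩
    refine ⟨k, by omega, fun t ht => ?_⟩
    have h' := h t ht
    rw [PySem.List.getD_map_range _ _ _ _ (by omega)] at h'
    have e : (fun q : Nat => f (0 + (q : Int))) (k + t) = f ((k : Int) + (t : Int)) := by
      show f _ = f _
      congr 1
      push_cast
      ring
    rw [← e]
    exact h'
  · rintro ⟨k, hk, h⟩
    refine ⟨k, by omega, fun t ht => ?_⟩
    rw [PySem.List.getD_map_range _ _ _ _ (by omega)]
    show f (0 + ((k + t : Nat) : Int)) = 1
    rw [show (0 : Int) + ((k + t : Nat) : Int) = (k : Int) + (t : Int) by push_cast; ring]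
    exact h t ht

theorem f_congr {f : Int → Int → Int} {x y x' y' : Int} (h : f x' y' = 1)
    (hx : x = x') (hy : y = y') : f x y = 1 := by rw [hx, hy]; exact h

-- the combinatorial heart: A's four per-cell lookaheads cover exactly the same 6-runs as the
-- row / column / two-diagonal-family run scans of B
theorem mainEquiv (f : Int → Int → Int) (n : Int) :
    (∃ i : Int, (0 ≤ i ∧ i < n) ∧ ∃ j : Int, (0 ≤ j ∧ j < n) ∧ f i j = 1 ∧
      ((i + 5 < n ∧ f (i+1) j = 1 ∧ f (i+2) j = 1 ∧ f (i+3) j = 1 ∧ f (i+4) j = 1 ∧ f (i+5) j = 1) ∨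
       (j + 5 < n ∧ f i (j+1) = 1 ∧ f i (j+2) = 1 ∧ f i (j+3) = 1 ∧ f i (j+4) = 1 ∧ f i (j+5) = 1) ∨
       (i + 5 < n ∧ j + 5 < n ∧ f (i+1) (j+1) = 1 ∧ f (i+2) (j+2) = 1 ∧ f (i+3) (j+3) = 1 ∧ f (i+4) (j+4) = 1 ∧ f (i+5) (j+5) = 1) ∨
       (i + 5 < n ∧ 0 ≤ j - 5 ∧ f (i+1) (j-1) = 1 ∧ f (i+2) (j-2) = 1 ∧ f (i+3) (j-3) = 1 ∧ f (i+4) (j-4) = 1 ∧ f (i+5) (j-5) = 1)))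
    ↔
    ((∃ i : Int, (0 ≤ i ∧ i < n) ∧ ∃ k : Nat, (k : Int) + 5 < n ∧ ∀ t : Nat, t ≤ 5 → f i ((k:Int)+(t:Int)) = 1) ∨
     (∃ j : Int, (0 ≤ j ∧ j < n) ∧ ∃ k : Nat, (k : Int) + 5 < n ∧ ∀ t : Nat, t ≤ 5 → f ((k:Int)+(t:Int)) j = 1) ∨
     (∃ a : Int, (0 ≤ a ∧ a < n) ∧ ∃ k : Nat, (k : Int) + 5 < n - a ∧ ∀ t : Nat, t ≤ 5 → f (a + ((k:Int)+(t:Int))) ((k:Int)+(t:Int)) = 1) ∨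
     (∃ b : Int, (1 ≤ b ∧ b < n) ∧ ∃ k : Nat, (k : Int) + 5 < n - b ∧ ∀ t : Nat, t ≤ 5 → f ((k:Int)+(t:Int)) (b + ((k:Int)+(t:Int))) = 1) ∨
     (∃ b : Int, (0 ≤ b ∧ b < n) ∧ ∃ k : Nat, (k : Int) + 5 < b + 1 ∧ ∀ t : Nat, t ≤ 5 → f ((k:Int)+(t:Int)) (b - ((k:Int)+(t:Int))) = 1) ∨
     (∃ a : Int, (1 ≤ a ∧ a < n) ∧ ∃ k : Nat, (k : Int) + 5 < n - a ∧ ∀ t : Nat, t ≤ 5 → f (a + ((k:Int)+(t:Int))) (n - 1 - ((k:Int)+(t:Int))) = 1)) := by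
  constructor
  · rintro ⟨i, ⟨hi0, hi1⟩, j, ⟨hj0, hj1⟩, hc,
      (⟨h5, e1, e2, e3, e4, e5⟩ | ⟨h5, e1, e2, e3, e4, e5⟩ |
       ⟨h5, h6, e1, e2, e3, e4, e5⟩ | ⟨h5, h6, e1, e2, e3, e4, e5⟩)⟩
    · -- down run → a column scan hit
      refine Or.inr (Or.inl ⟨j, ⟨hj0, hj1⟩, i.toNat, by omega, fun t ht => ?_⟩)
      interval_cases t
      · exact f_congr hc (by omega) rfl
      · exact f_congr e1 (by omega) rfl
      · exact f_congr e2 (by omega) rfl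
      · exact f_congr e3 (by omega) rfl
      · exact f_congr e4 (by omega) rfl
      · exact f_congr e5 (by omega) rfl
    · -- right run → a row scan hit
      refine Or.inl ⟨i, ⟨hi0, hi1⟩, j.toNat, by omega, fun t ht => ?_⟩
      interval_cases t
      · exact f_congr hc rfl (by omega)
      · exact f_congr e1 rfl (by omega)
      · exact f_congr e2 rfl (by omega)
      · exact f_congr e3 rfl (by omega)
      · exact f_congr e4 rfl (by omega)
      · exact f_congr e5 rfl (by omega)
    · -- down-right run → one of the two ↘ diagonal families
      by_cases hij : j ≤ i
      · refine Or.inr (Or.inr (Or.inl ⟨i - j, ⟨by omega, by omega⟩, j.toNat, by omega,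
          fun t ht => ?_⟩))
        interval_cases t
        · exact f_congr hc (by omega) (by omega)
        · exact f_congr e1 (by omega) (by omega)
        · exact f_congr e2 (by omega) (by omega)
        · exact f_congr e3 (by omega) (by omega)
        · exact f_congr e4 (by omega) (by omega)
        · exact f_congr e5 (by omega) (by omega)
      · refine Or.inr (Or.inr (Or.inr (Or.inl ⟨j - i, ⟨by omega, by omega⟩, i.toNat, by omega,
          fun t ht => ?_⟩)))
        interval_cases t
        · exact f_congr hc (by omega) (by omega)
        · exact f_congr e1 (by omega) (by omega)
        · exact f_congr e2 (by omega) (by omega)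
        · exact f_congr e3 (by omega) (by omega)
        · exact f_congr e4 (by omega) (by omega)
        · exact f_congr e5 (by omega) (by omega)
    · -- down-left run → one of the two ↙ diagonal families
      by_cases hij : i + j < n
      · refine Or.inr (Or.inr (Or.inr (Or.inr (Or.inl ⟨i + j, ⟨by omega, by omega⟩, i.toNat,
          by omega, fun t ht => ?_⟩))))
        interval_cases t
        · exact f_congr hc (by omega) (by omega)
        · exact f_congr e1 (by omega) (by omega)
        · exact f_congr e2 (by omega) (by omega)
        · exact f_congr e3 (by omega) (by omega)
        · exact f_congr e4 (by omega) (by omega)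
        · exact f_congr e5 (by omega) (by omega)
      · refine Or.inr (Or.inr (Or.inr (Or.inr (Or.inr ⟨i + j - n + 1, ⟨by omega, by omega⟩,
          (n - 1 - j).toNat, by omega, fun t ht => ?_⟩))))
        interval_cases t
        · exact f_congr hc (by omega) (by omega)
        · exact f_congr e1 (by omega) (by omega)
        · exact f_congr e2 (by omega) (by omega)
        · exact f_congr e3 (by omega) (by omega)
        · exact f_congr e4 (by omega) (by omega)
        · exact f_congr e5 (by omega) (by omega)
  · rintro (⟨i, ⟨hi0, hi1⟩, k, hk, h⟩ | ⟨j, ⟨hj0, hj1⟩, k, hk, h⟩ |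
      ⟨a, ⟨ha0, ha1⟩, k, hk, h⟩ | ⟨b, ⟨hb0, hb1⟩, k, hk, h⟩ |
      ⟨b, ⟨hb0, hb1⟩, k, hk, h⟩ | ⟨a, ⟨ha0, ha1⟩, k, hk, h⟩)
    · -- row hit → right case
      exact ⟨i, ⟨hi0, hi1⟩, (k : Int), ⟨by omega, by omega⟩,
        f_congr (h 0 (by omega)) rfl (by omega),
        Or.inr (Or.inl ⟨by omega,
          f_congr (h 1 (by omega)) rfl (by omega), f_congr (h 2 (by omega)) rfl (by omega),
          f_congr (h 3 (by omega)) rfl (by omega), f_congr (h 4 (by omega)) rfl (by omega),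
          f_congr (h 5 (by omega)) rfl (by omega)⟩)⟩
    · -- column hit → down case
      exact ⟨(k : Int), ⟨by omega, by omega⟩, j, ⟨hj0, hj1⟩,
        f_congr (h 0 (by omega)) (by omega) rfl,
        Or.inl ⟨by omega,
          f_congr (h 1 (by omega)) (by omega) rfl, f_congr (h 2 (by omega)) (by omega) rfl,
          f_congr (h 3 (by omega)) (by omega) rfl, f_congr (h 4 (by omega)) (by omega) rfl,
          f_congr (h 5 (by omega)) (by omega) rfl⟩⟩
    · -- ↘ diagonal (left-column start) → down-right case
      exact ⟨a + (k : Int), ⟨by omega, by omega⟩, (k : Int), ⟨by omega, by omega⟩,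
        f_congr (h 0 (by omega)) (by omega) (by omega),
        Or.inr (Or.inr (Or.inl ⟨by omega, by omega,
          f_congr (h 1 (by omega)) (by omega) (by omega),
          f_congr (h 2 (by omega)) (by omega) (by omega),
          f_congr (h 3 (by omega)) (by omega) (by omega),
          f_congr (h 4 (by omega)) (by omega) (by omega),
          f_congr (h 5 (by omega)) (by omega) (by omega)⟩))⟩
    · -- ↘ diagonal (top-row start) → down-right case
      exact ⟨(k : Int), ⟨by omega, by omega⟩, b + (k : Int), ⟨by omega, by omega⟩,
        f_congr (h 0 (by omega)) (by omega) (by omega),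
        Or.inr (Or.inr (Or.inl ⟨by omega, by omega,
          f_congr (h 1 (by omega)) (by omega) (by omega),
          f_congr (h 2 (by omega)) (by omega) (by omega),
          f_congr (h 3 (by omega)) (by omega) (by omega),
          f_congr (h 4 (by omega)) (by omega) (by omega),
          f_congr (h 5 (by omega)) (by omega) (by omega)⟩))⟩
    · -- ↙ diagonal (top-row start) → down-left case
      exact ⟨(k : Int), ⟨by omega, by omega⟩, b - (k : Int), ⟨by omega, by omega⟩,
        f_congr (h 0 (by omega)) (by omega) (by omega),
        Or.inr (Or.inr (Or.inr ⟨by omega, by omega,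
          f_congr (h 1 (by omega)) (by omega) (by omega),
          f_congr (h 2 (by omega)) (by omega) (by omega),
          f_congr (h 3 (by omega)) (by omega) (by omega),
          f_congr (h 4 (by omega)) (by omega) (by omega),
          f_congr (h 5 (by omega)) (by omega) (by omega)⟩))⟩
    · -- ↙ diagonal (right-column start) → down-left case
      exact ⟨a + (k : Int), ⟨by omega, by omega⟩, n - 1 - (k : Int), ⟨by omega, by omega⟩,
        f_congr (h 0 (by omega)) (by omega) (by omega),
        Or.inr (Or.inr (Or.inr ⟨by omega, by omega,
          f_congr (h 1 (by omega)) (by omega) (by omega),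
          f_congr (h 2 (by omega)) (by omega) (by omega),
          f_congr (h 3 (by omega)) (by omega) (by omega),
          f_congr (h 4 (by omega)) (by omega) (by omega),
          f_congr (h 5 (by omega)) (by omega) (by omega)⟩))⟩


theorem check_iff (n : Int) (s : List (List String)) :
    check n s = true ↔
    (∃ i : Int, (0 ≤ i ∧ i < n) ∧ ∃ j : Int, (0 ≤ j ∧ j < n) ∧ cell (convGrid n s) i j = 1 ∧
      ((i + 5 < n ∧ cell (convGrid n s) (i+1) j = 1 ∧ cell (convGrid n s) (i+2) j = 1 ∧ cell (convGrid n s) (i+3) j = 1 ∧ cell (convGrid n s) (i+4) j = 1 ∧ cell (convGrid n s) (i+5) j = 1) ∨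
       (j + 5 < n ∧ cell (convGrid n s) i (j+1) = 1 ∧ cell (convGrid n s) i (j+2) = 1 ∧ cell (convGrid n s) i (j+3) = 1 ∧ cell (convGrid n s) i (j+4) = 1 ∧ cell (convGrid n s) i (j+5) = 1) ∨
       (i + 5 < n ∧ j + 5 < n ∧ cell (convGrid n s) (i+1) (j+1) = 1 ∧ cell (convGrid n s) (i+2) (j+2) = 1 ∧ cell (convGrid n s) (i+3) (j+3) = 1 ∧ cell (convGrid n s) (i+4) (j+4) = 1 ∧ cell (convGrid n s) (i+5) (j+5) = 1) ∨
       (i + 5 < n ∧ 0 ≤ j - 5 ∧ cell (convGrid n s) (i+1) (j-1) = 1 ∧ cell (convGrid n s) (i+2) (j-2) = 1 ∧ cell (convGrid n s) (i+3) (j-3) = 1 ∧ cell (convGrid n s) (i+4) (j-4) = 1 ∧ cell (convGrid n s) (i+5) (j-5) = 1))) := by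
  unfold check
  simp only [List.any_eq_true, PySem.List.mem_pyRange_one, Bool.and_eq_true, Bool.or_eq_true,
    decide_eq_true_eq, beq_iff_eq]
  simp only [and_assoc, or_assoc]

theorem check_alt_iff (n : Int) (s : List (List String)) :
    check_alt n s = true ↔
    ((∃ i : Int, (0 ≤ i ∧ i < n) ∧ ∃ k : Nat, (k : Int) + 5 < n ∧ ∀ t : Nat, t ≤ 5 → cell (convGrid n s) i ((k:Int)+(t:Int)) = 1) ∨
     (∃ j : Int, (0 ≤ j ∧ j < n) ∧ ∃ k : Nat, (k : Int) + 5 < n ∧ ∀ t : Nat, t ≤ 5 → cell (convGrid n s) ((k:Int)+(t:Int)) j = 1) ∨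
     (∃ a : Int, (0 ≤ a ∧ a < n) ∧ ∃ k : Nat, (k : Int) + 5 < n - a ∧ ∀ t : Nat, t ≤ 5 → cell (convGrid n s) (a + ((k:Int)+(t:Int))) ((k:Int)+(t:Int)) = 1) ∨
     (∃ b : Int, (1 ≤ b ∧ b < n) ∧ ∃ k : Nat, (k : Int) + 5 < n - b ∧ ∀ t : Nat, t ≤ 5 → cell (convGrid n s) ((k:Int)+(t:Int)) (b + ((k:Int)+(t:Int))) = 1) ∨
     (∃ b : Int, (0 ≤ b ∧ b < n) ∧ ∃ k : Nat, (k : Int) + 5 < b + 1 ∧ ∀ t : Nat, t ≤ 5 → cell (convGrid n s) ((k:Int)+(t:Int)) (b - ((k:Int)+(t:Int))) = 1) ∨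
     (∃ a : Int, (1 ≤ a ∧ a < n) ∧ ∃ k : Nat, (k : Int) + 5 < n - a ∧ ∀ t : Nat, t ≤ 5 → cell (convGrid n s) (a + ((k:Int)+(t:Int))) (n - 1 - ((k:Int)+(t:Int))) = 1)) := by
  unfold check_alt
  simp only [Bool.or_eq_true, List.any_eq_true, PySem.List.mem_pyRange_one, runScan_zero_iff,
    has6_line, and_assoc, or_assoc]

-- ===== VERDICT (by name: the statement is the Claim_ definition above) =====
theorem check_spec : Claim_equal_check := by
  intro n s _ _
  unfold Spec_check
  have h : check n s = true ↔ check_alt n s = true :=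
    (check_iff n s).trans ((mainEquiv (cell (convGrid n s)) n).trans (check_alt_iff n s).symm)
  cases hA : check n s <;> cases hB : check_alt n s <;> simp_all
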